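-- pv_equiv track=rewrite | github.com/5aim/programmers_coding_test | Lv_0/day_4_03_홀짝에_따라_다른_값_반환하기.py | solution
-- ===== SOURCE A (Python) =====
-- def solution(n):
--     answer = 0
--     if 1 <= n <= 100:
--         if n % 2 == 0:
--             answer = sum(i**2 for i in range(2, n+1, 2))
--         else:
--             answer = sum(range(1, n+1, 2))
--     return answer
-- ===== SOURCE B (Python) =====
-- def solution(n):
--     if not 1 <= n <= 100:
--         return 0
--     if n % 2:
--         k = (n + 1) // 2
--         return k * k  # sum of first k odd numbers
--     m = n // 2
--     return 2 * m * (m + 1) * (2 * m + 1) // 3  # 4 * sum of squares 1..m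
-- ===== Notes on version B (the rewrite author's own statement) =====
-- stated objective: alternative
-- what changed: Replaces the range summations with closed-form arithmetic formulas (square of the count of odds, and a scaled sum-of-squares formula for evens), so no range is built or traversed.
import Mathlib
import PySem

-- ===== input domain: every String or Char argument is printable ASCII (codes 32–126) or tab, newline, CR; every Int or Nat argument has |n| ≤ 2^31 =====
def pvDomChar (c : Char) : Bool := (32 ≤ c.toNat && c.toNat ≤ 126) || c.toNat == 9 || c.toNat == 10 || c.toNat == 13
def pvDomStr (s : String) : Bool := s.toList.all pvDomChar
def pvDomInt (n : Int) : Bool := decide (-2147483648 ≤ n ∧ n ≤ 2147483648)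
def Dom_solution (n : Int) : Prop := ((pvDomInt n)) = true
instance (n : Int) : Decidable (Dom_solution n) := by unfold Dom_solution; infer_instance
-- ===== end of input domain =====

-- ===== PORT A =====
-- A sums ranges; B (solution_alt) computes the same values by closed-form arithmetic formulas (alternative algorithm).
def solution (n : Int) : Int :=
  let answer : Int := 0
  if 1 ≤ n ∧ n ≤ 100 then
    if PySem.Int.mod n 2 == 0 then
      (PySem.List.pyRange 2 (n+1) 2).foldl (fun a i => a + i ^ 2) 0
    else
      (PySem.List.pyRange 1 (n+1) 2).foldl (fun a i => a + i) 0
  else answer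

-- ===== PORT B =====
def solution_alt (n : Int) : Int :=
  if 1 ≤ n ∧ n ≤ 100 then
    if PySem.Int.mod n 2 ≠ 0 then
      let k := PySem.Int.floordiv (n + 1) 2
      k * k
    else
      let m := PySem.Int.floordiv n 2
      PySem.Int.floordiv (2 * m * (m + 1) * (2 * m + 1)) 3
  else 0

-- ===== PRECONDITION & SPEC =====
def Spec_solution (n : Int) (out : Int) : Prop := out = solution_alt n
instance (n : Int) (out : Int) : Decidable (Spec_solution n out) := by unfold Spec_solution; infer_instance

-- ===== CLAIM (what is proved, stated in full; the proofs are below) =====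
def Claim_equal_solution : Prop := ∀ (n : Int), Dom_solution n → Spec_solution n (solution n)

-- ===== LEMMAS AND PROOFS =====

-- ===== VERDICT (by name: the statement is the Claim_ definition above) =====
theorem solution_spec : Claim_equal_solution := by
  intro n _
  unfold Spec_solution solution solution_alt
  by_cases h : 1 ≤ n ∧ n ≤ 100
  · obtain ⟨h1, h2⟩ := h
    interval_cases n <;> decide
  · simp [h]
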